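-- pv_equiv track=rewrite | github.com/ay0ks/BakaASM | bakaasm.py | sort_usings
-- ===== SOURCE A (Python) =====
-- def sort_usings(source):
--   _instr = []
--   _usings = []
--
--   for instr in source:
--     if "_using" in instr:
--       _usings.append(instr)
--     else:
--       _instr.append(instr)
--
--   return sorted(_usings) + _instr
-- ===== SOURCE B (Python) =====
-- def sort_usings(source):
--   # One stable sort: usings get key (0, instr) (sorted by content), others share key (1,)
--   # and keep their original relative order by stability.
--   return sorted(source, key=lambda instr: (0, instr) if "_using" in instr else (1,))
-- ===== Notes on version B (the rewrite author's own statement) =====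
-- stated objective: simpler
-- what changed: Replaced the two-list partition plus sort-and-concatenate with a single stable sorted() call whose key sends using-instructions to (0, instr) and all others to the shared key (1,), so stability preserves their original order.
import Mathlib
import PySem

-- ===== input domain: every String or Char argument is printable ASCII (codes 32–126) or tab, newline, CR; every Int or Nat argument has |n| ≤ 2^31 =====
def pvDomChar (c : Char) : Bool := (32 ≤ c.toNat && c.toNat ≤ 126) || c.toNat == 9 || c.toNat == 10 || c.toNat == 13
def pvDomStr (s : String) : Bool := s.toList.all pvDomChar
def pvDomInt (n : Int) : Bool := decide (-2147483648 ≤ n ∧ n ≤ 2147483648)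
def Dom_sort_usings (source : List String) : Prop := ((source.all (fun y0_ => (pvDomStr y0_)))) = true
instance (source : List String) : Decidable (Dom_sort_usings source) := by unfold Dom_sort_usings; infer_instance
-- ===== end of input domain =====

-- B replaces A's partition-then-concatenate with a single stable keyed sort (objective: simpler).

-- ===== PORT A =====
def sort_usings (source : List String) : List String :=
  let st := source.foldl
    (fun (p : List String × List String) instr =>
      if PySem.Str.isIn "_using" instr then (p.1, p.2 ++ [instr]) else (p.1 ++ [instr], p.2))
    ([], [])
  PySem.List.sorted st.2 (fun x => x) false ++ st.1

-- ===== PORT B =====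
-- Python B's key is (0, instr) for usings and the 1-tuple (1,) for others; ported with tuple
-- keys ((if using then 0 else 1), (if using then instr else "")). Exact: the (1,) keys are
-- mutually equal, and only their first component is ever compared against a (0, instr) key.
def sort_usings_alt (source : List String) : List String :=
  PySem.List.sorted2 source
    (fun instr => if PySem.Str.isIn "_using" instr then (0 : Int) else 1)
    (fun instr => if PySem.Str.isIn "_using" instr then instr else "")
    false

-- ===== PRECONDITION & SPEC =====
def Spec_sort_usings (source : List String) (out : List String) : Prop := out = sort_usings_alt source
instance (source : List String) (out : List String) : Decidable (Spec_sort_usings source out) := by unfold Spec_sort_usings; infer_instance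

-- ===== CLAIM (what is proved, stated in full; the proofs are below) =====
def Claim_equal_sort_usings : Prop := ∀ (source : List String), Dom_sort_usings source → Spec_sort_usings source (sort_usings source)

-- ===== LEMMAS AND PROOFS =====

-- whether an instruction is a "using" instruction
def pvP (i : String) : Bool := PySem.Str.isIn "_using" i

-- B's comparison function (the `lt` that PySem.List.sorted2 builds from B's two keys)
def pvLt (a b : String) : Bool :=
  decide ((if pvP a then (0 : Int) else 1) < (if pvP b then (0 : Int) else 1)) ||
    (!decide ((if pvP b then (0 : Int) else 1) < (if pvP a then (0 : Int) else 1)) &&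
      decide ((if pvP a then a else "") < (if pvP b then b else "")))

theorem pvLt_of_P_of_notP {a b : String} (ha : pvP a = true) (hb : pvP b = false) :
    pvLt a b = true := by simp [pvLt, ha, hb]

theorem pvLt_of_notP {a b : String} (ha : pvP a = false) : pvLt a b = false := by
  cases hb : pvP b <;> simp [pvLt, ha, hb]

theorem pvLt_of_P_of_P {a b : String} (ha : pvP a = true) (hb : pvP b = true) :
    pvLt a b = decide (a < b) := by simp [pvLt, ha, hb]

@[simp] theorem insertBy_nil' {α : Type} (bef : α → α → Bool) (x : α) :
    PySem.List.insertBy bef x [] = [x] := rfl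

@[simp] theorem insertBy_cons' {α : Type} (bef : α → α → Bool) (x y : α) (ys : List α) :
    PySem.List.insertBy bef x (y :: ys) =
      if bef x y then x :: y :: ys else y :: PySem.List.insertBy bef x ys := rfl

-- inserting an element that goes before everything in `bs` happens inside `as`
theorem insertBy_append_of_before {α : Type} (bef : α → α → Bool) (x : α) (as bs : List α)
    (h : ∀ y ∈ bs, bef x y = true) :
    PySem.List.insertBy bef x (as ++ bs) = PySem.List.insertBy bef x as ++ bs := by
  induction as with
  | nil =>
    cases bs with
    | nil => rfl
    | cons b bs' => simp [h b (by simp)]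
  | cons a as ih =>
    simp only [List.cons_append, insertBy_cons']
    by_cases hxa : bef x a = true
    · simp [hxa]
    · simp only [Bool.not_eq_true] at hxa
      simp [hxa, ih]

-- on lists of using-instructions, B's comparison behaves as plain string comparison
theorem foldl_insertBy_congr (l : List String) (acc : List String)
    (hl : ∀ y ∈ l, pvP y = true) (hacc : ∀ y ∈ acc, pvP y = true) :
    l.foldl (fun acc x => PySem.List.insertBy pvLt x acc) acc =
      l.foldl (fun acc x => PySem.List.insertBy (fun a b => decide (a < b)) x acc) acc := by
  induction l generalizing acc with
  | nil => rfl
  | cons x l ih =>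
    have hx : pvP x = true := hl x (by simp)
    have hins : PySem.List.insertBy pvLt x acc =
        PySem.List.insertBy (fun a b => decide (a < b)) x acc := by
      clear ih
      induction acc with
      | nil => rfl
      | cons a as iha =>
        have ha : pvP a = true := hacc a (by simp)
        have := pvLt_of_P_of_P hx ha
        simp only [insertBy_cons', this]
        rw [iha (fun y hy => hacc y (by simp [hy]))]
    simp only [List.foldl_cons, hins]
    refine ih _ (fun y hy => hl y (by simp [hy])) ?_
    intro y hy
    rcases (PySem.List.mem_insertBy _ x y acc).mp hy with h | h
    · exact h ▸ hx
    · exact hacc y h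

-- abbreviation: insertion sort of a list of usings with B's comparison
def pvSortL (us : List String) : List String :=
  us.foldl (fun acc x => PySem.List.insertBy pvLt x acc) []

-- main invariant of B's fold: the accumulator is always (sorted usings so far) ++ (others so far)
theorem pv_main (l : List String) (us vs : List String)
    (hus : ∀ y ∈ us, pvP y = true) (hvs : ∀ y ∈ vs, pvP y = false) :
    l.foldl (fun acc x => PySem.List.insertBy pvLt x acc) (pvSortL us ++ vs) =
      pvSortL (us ++ l.filter (fun x => pvP x)) ++ (vs ++ l.filter (fun x => !pvP x)) := by
  induction l generalizing us vs with
  | nil => simp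
  | cons x l ih =>
    by_cases hx : pvP x = true
    · have hstep : PySem.List.insertBy pvLt x (pvSortL us ++ vs) = pvSortL (us ++ [x]) ++ vs := by
        rw [insertBy_append_of_before pvLt x _ _
          (fun y hy => pvLt_of_P_of_notP hx (hvs y hy))]
        congr 1
        simp [pvSortL]
      have hus' : ∀ y ∈ us ++ [x], pvP y = true := by
        intro y hy
        rcases List.mem_append.mp hy with h | h
        · exact hus y h
        · simp at h; exact h ▸ hx
      simp only [List.foldl_cons, hstep]
      rw [ih (us ++ [x]) vs hus' hvs]
      simp [hx]
    · simp only [Bool.not_eq_true] at hx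
      have hstep : PySem.List.insertBy pvLt x (pvSortL us ++ vs) = pvSortL us ++ (vs ++ [x]) := by
        rw [PySem.List.insertBy_of_forall_not_before pvLt x _ ?_]
        · simp
        · intro y _
          exact pvLt_of_notP hx
      have hvs' : ∀ y ∈ vs ++ [x], pvP y = false := by
        intro y hy
        rcases List.mem_append.mp hy with h | h
        · exact hvs y h
        · simp at h; exact h ▸ hx
      simp only [List.foldl_cons, hstep]
      rw [ih us (vs ++ [x]) hus hvs']
      simp [hx]

-- A's partition loop computes the two filters
theorem pv_partition (l : List String) (a b : List String) :
    l.foldl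
      (fun (p : List String × List String) instr =>
        if PySem.Str.isIn "_using" instr then (p.1, p.2 ++ [instr]) else (p.1 ++ [instr], p.2))
      (a, b) =
      (a ++ l.filter (fun x => !pvP x), b ++ l.filter (fun x => pvP x)) := by
  induction l generalizing a b with
  | nil => simp
  | cons x l ih =>
    simp only [List.foldl_cons]
    by_cases hx : pvP x = true
    · rw [if_pos (show PySem.Str.isIn "_using" x = true from hx), ih]
      simp [hx]
    · simp only [Bool.not_eq_true] at hx
      rw [if_neg (by rw [show PySem.Str.isIn "_using" x = false from hx]; simp), ih]
      simp [hx]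

-- ===== VERDICT (by name: the statement is the Claim_ definition above) =====
theorem sort_usings_spec : Claim_equal_sort_usings := by
  intro source _
  unfold Spec_sort_usings sort_usings sort_usings_alt
  rw [pv_partition source [] []]
  simp only [List.nil_append]
  have hB : PySem.List.sorted2 source
      (fun instr => if PySem.Str.isIn "_using" instr then (0 : Int) else 1)
      (fun instr => if PySem.Str.isIn "_using" instr then instr else "") false =
      source.foldl (fun acc x => PySem.List.insertBy pvLt x acc) [] := rfl
  rw [hB]
  have := pv_main source [] [] (by simp) (by simp)
  simp only [pvSortL, List.foldl_nil, List.nil_append, List.append_nil] at this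
  rw [this]
  congr 1
  rw [PySem.List.sorted_eq_foldl_insertBy]
  exact (foldl_insertBy_congr _ [] (fun y hy => (List.mem_filter.mp hy).2) (by simp)).symm
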